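-- pv_equiv track=rewrite | github.com/sky7th/BOJ | programmers/단어 퍼즐.py | solution
-- ===== SOURCE A (Python) =====
-- def solution(strs, t):
--     size = len(t)
--     dp = [-1]*(size+1)
--     dp[0] = 0
--     str_set = set(strs)
--
--     for i in range(1, size+1):
--         for j in range(1, 6):
--             if i-j>=0 and t[i-j:i] in str_set and dp[i-j] != -1:
--                 if dp[i] == -1:
--                     dp[i] = dp[i-j] + 1
--                 else:
--                     dp[i] = min(dp[i], dp[i-j] + 1)
--     return dp[-1]
-- ===== SOURCE B (Python) =====
-- def solution(strs, t):
--     n = len(t)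
--     str_set = set(strs)
--     memo = {0: 0}  # min pieces to build t[:i]; None = unbuildable
--
--     def best(i):
--         if i in memo:
--             return memo[i]
--         res = None
--         for j in range(1, 6):
--             if j <= i and t[i - j:i] in str_set:
--                 sub = best(i - j)
--                 if sub is not None:
--                     cand = sub + 1
--                     if res is None or cand < res:
--                         res = cand
--         memo[i] = res
--         return res
--
--     r = None
--     for i in range(n + 1):  # warm the memo in order: keeps recursion depth <= 5
--         r = best(i)
--     return -1 if r is None else r
-- ===== Notes on version B (the rewrite author's own statement) =====
-- stated objective: alternative
-- what changed: Replaces A's bottom-up dp array with -1 sentinels and a nested index loop by a top-down memoized recursion best(i) over prefixes that returns None for unreachable positions and converts to -1 only at the end.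
import Mathlib
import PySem

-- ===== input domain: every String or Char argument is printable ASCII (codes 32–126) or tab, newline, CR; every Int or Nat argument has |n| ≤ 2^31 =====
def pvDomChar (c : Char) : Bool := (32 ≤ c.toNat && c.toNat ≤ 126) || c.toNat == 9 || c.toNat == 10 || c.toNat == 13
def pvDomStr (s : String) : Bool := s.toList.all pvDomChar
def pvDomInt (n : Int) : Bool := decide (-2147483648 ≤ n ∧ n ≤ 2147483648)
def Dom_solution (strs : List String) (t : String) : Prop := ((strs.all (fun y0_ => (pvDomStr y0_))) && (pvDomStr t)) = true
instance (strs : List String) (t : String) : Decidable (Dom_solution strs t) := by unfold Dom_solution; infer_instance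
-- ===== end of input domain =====

-- B replaces A's bottom-up dp array with -1 sentinels by a top-down memoized
-- recursion over prefixes using None for "unbuildable" (alternative decomposition, same cost).

-- ===== PORT A =====
-- the body of A's inner 'for j in range(1, 6)' loop, named so the proofs can refer to it
def pvAInner (t : String) (strSet : PySem.Set String) (i : Int) (dp : List Int) (j : Int) : List Int :=
  if i - j ≥ 0 ∧ PySem.Str.slice t (some (i - j)) (some i) ∈ strSet ∧
      PySem.List.pyGetD dp (i - j) (-1) ≠ -1 then
    if PySem.List.pyGetD dp i (-1) = -1 then
      PySem.List.pySetD dp i (PySem.List.pyGetD dp (i - j) (-1) + 1)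
    else
      PySem.List.pySetD dp i (min (PySem.List.pyGetD dp i (-1)) (PySem.List.pyGetD dp (i - j) (-1) + 1))
  else dp

def solution (strs : List String) (t : String) : Int :=
  let size : Int := PySem.Str.len t
  let strSet : PySem.Set String := PySem.Set.ofList strs
  let dp : List Int := PySem.List.pySetD (List.replicate (size + 1).toNat (-1)) 0 0
  let dp := (PySem.List.pyRange 1 (size + 1) 1).foldl
    (fun dp i => (PySem.List.pyRange 1 6 1).foldl (pvAInner t strSet i) dp) dp
  PySem.List.pyGetD dp (-1) (-1)

-- ===== PORT B =====
-- 'if res is None or cand < res: res = cand' folded over one candidate sub-result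
def pvComb (res sub : Option Int) : Option Int :=
  match sub with
  | none => res
  | some s =>
    match res with
    | none => some (s + 1)
    | some r => some (min r (s + 1))

-- one iteration of B's 'for j in range(1, 6)' body: state (res, memo), recursive call `call`
def pvTry (t : String) (ss : PySem.Set String) (i j : Nat)
    (st : Option Int × PySem.Dict Nat (Option Int))
    (call : PySem.Dict Nat (Option Int) → Option Int × PySem.Dict Nat (Option Int)) :
    Option Int × PySem.Dict Nat (Option Int) :=
  if j ≤ i ∧ PySem.Str.slice t (some ((i : Int) - (j : Int))) (some (i : Int)) ∈ ss then
    let p := call st.2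
    (pvComb st.1 p.1, p.2)
  else st

-- B's memoized best(i); the j-loop is unrolled (j = 1..5) so termination is structural on i
def pvBest (t : String) (ss : PySem.Set String) :
    Nat → PySem.Dict Nat (Option Int) → Option Int × PySem.Dict Nat (Option Int)
  | 0, memo =>
    (match memo.get? 0 with
     | some v => (v, memo)
     | none => (none, memo.insert 0 none))
  | i + 1, memo =>
    match memo.get? (i + 1) with
    | some v => (v, memo)
    | none =>
      let s1 := pvTry t ss (i + 1) 1 (none, memo) (fun m => pvBest t ss (i + 1 - 1) m)
      let s2 := pvTry t ss (i + 1) 2 s1 (fun m => pvBest t ss (i + 1 - 2) m)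
      let s3 := pvTry t ss (i + 1) 3 s2 (fun m => pvBest t ss (i + 1 - 3) m)
      let s4 := pvTry t ss (i + 1) 4 s3 (fun m => pvBest t ss (i + 1 - 4) m)
      let s5 := pvTry t ss (i + 1) 5 s4 (fun m => pvBest t ss (i + 1 - 5) m)
      (s5.1, s5.2.insert (i + 1) s5.1)
  termination_by i _ => i
  decreasing_by all_goals omega

def solution_alt (strs : List String) (t : String) : Int :=
  let n : Nat := (PySem.Str.len t).toNat
  let strSet : PySem.Set String := PySem.Set.ofList strs
  let memo : PySem.Dict Nat (Option Int) := PySem.Dict.empty.insert 0 (some 0)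
  -- 'for i in range(n + 1): r = best(i)' — i ≥ 0 on the range, so i.toNat is exact
  let st : Option Int × PySem.Dict Nat (Option Int) := (none, memo)
  let st := (PySem.List.pyRange 0 ((n : Int) + 1) 1).foldl
    (fun st i => pvBest t strSet i.toNat st.2) st
  match st.1 with
  | none => -1
  | some k => k

-- ===== PRECONDITION & SPEC =====
def Spec_solution (strs : List String) (t : String) (out : Int) : Prop := out = solution_alt strs t
instance (strs : List String) (t : String) (out : Int) : Decidable (Spec_solution strs t out) := by unfold Spec_solution; infer_instance

-- ===== CLAIM (what is proved, stated in full; the proofs are below) =====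
def Claim_equal_solution : Prop := ∀ (strs : List String) (t : String), Dom_solution strs t → Spec_solution strs t (solution strs t)

-- ===== LEMMAS AND PROOFS =====

-- the pure (memo-free) value of best(i): min pieces to build the first i characters of t
def pvMStep (t : String) (ss : PySem.Set String) (i j : Nat) (res sub : Option Int) : Option Int :=
  if j ≤ i ∧ PySem.Str.slice t (some ((i : Int) - (j : Int))) (some (i : Int)) ∈ ss then
    pvComb res sub
  else res

def pvM (t : String) (ss : PySem.Set String) : Nat → Option Int
  | 0 => some 0
  | i + 1 =>
    let r1 := pvMStep t ss (i + 1) 1 none (pvM t ss (i + 1 - 1))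
    let r2 := pvMStep t ss (i + 1) 2 r1 (pvM t ss (i + 1 - 2))
    let r3 := pvMStep t ss (i + 1) 3 r2 (pvM t ss (i + 1 - 3))
    let r4 := pvMStep t ss (i + 1) 4 r3 (pvM t ss (i + 1 - 4))
    let r5 := pvMStep t ss (i + 1) 5 r4 (pvM t ss (i + 1 - 5))
    r5
  termination_by i => i
  decreasing_by all_goals omega

def pvOk (o : Option Int) : Prop := ∀ v, o = some v → 0 ≤ v

lemma pvComb_ok {res sub : Option Int} (h1 : pvOk res) (h2 : pvOk sub) : pvOk (pvComb res sub) := by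
  cases sub with
  | none => exact h1
  | some s =>
    cases res with
    | none => intro v hv; simp [pvComb] at hv; have := h2 s rfl; omega
    | some r =>
      intro v hv; simp [pvComb] at hv
      have := h1 r rfl; have := h2 s rfl
      rcases min_cases r (s + 1) with ⟨e, _⟩ | ⟨e, _⟩ <;> omega

lemma pvMStep_ok {t ss i j res sub} (h1 : pvOk res) (h2 : pvOk sub) :
    pvOk (pvMStep t ss i j res sub) := by
  unfold pvMStep; split
  · exact pvComb_ok h1 h2
  · exact h1

lemma pvM_ok (t : String) (ss : PySem.Set String) : ∀ i, pvOk (pvM t ss i) := by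
  intro i
  induction i using Nat.strong_induction_on with
  | _ i IH =>
    cases i with
    | zero => intro v hv; simp [pvM] at hv; omega
    | succ n =>
      have h0 : pvOk (none : Option Int) := by intro v hv; simp at hv
      simp only [pvM]
      exact pvMStep_ok (pvMStep_ok (pvMStep_ok (pvMStep_ok (pvMStep_ok h0
        (IH _ (by omega))) (IH _ (by omega))) (IH _ (by omega))) (IH _ (by omega))) (IH _ (by omega))

-- memo soundness: every stored entry is the pure value, and 0 is always stored as 0
def pvValid (t : String) (ss : PySem.Set String) (m : PySem.Dict Nat (Option Int)) : Prop :=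
  m.get? 0 = some (some 0) ∧ ∀ k v, m.get? k = some v → v = pvM t ss k

lemma pvTry_ok {t ss} (i j : Nat) (st : Option Int × PySem.Dict Nat (Option Int))
    (call : PySem.Dict Nat (Option Int) → Option Int × PySem.Dict Nat (Option Int))
    (hst : pvValid t ss st.2)
    (hcall : ∀ m, pvValid t ss m → (call m).1 = pvM t ss (i - j) ∧ pvValid t ss (call m).2) :
    (pvTry t ss i j st call).1 = pvMStep t ss i j st.1 (pvM t ss (i - j)) ∧
      pvValid t ss (pvTry t ss i j st call).2 := by
  unfold pvTry pvMStep
  split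
  · obtain ⟨h1, h2⟩ := hcall st.2 hst
    exact ⟨by simp [h1], h2⟩
  · exact ⟨rfl, hst⟩

lemma pvBest_ok (t : String) (ss : PySem.Set String) :
    ∀ i m, pvValid t ss m →
      (pvBest t ss i m).1 = pvM t ss i ∧ pvValid t ss (pvBest t ss i m).2 := by
  intro i
  induction i using Nat.strong_induction_on with
  | _ i IH =>
    intro m hm
    cases i with
    | zero =>
      simp only [pvBest, hm.1]
      exact ⟨by simp [pvM], hm⟩
    | succ n =>
      cases hget : m.get? (n + 1) with
      | some v =>
        simp only [pvBest, hget]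
        exact ⟨hm.2 _ _ hget, hm⟩
      | none =>
        simp only [pvBest, hget]
        have h1 := pvTry_ok (t := t) (ss := ss) (n + 1) 1 (none, m)
          (fun m' => pvBest t ss (n + 1 - 1) m') hm
          (fun m' hm' => IH (n + 1 - 1) (by omega) m' hm')
        have h2 := pvTry_ok (t := t) (ss := ss) (n + 1) 2 _
          (fun m' => pvBest t ss (n + 1 - 2) m') h1.2
          (fun m' hm' => IH (n + 1 - 2) (by omega) m' hm')
        have h3 := pvTry_ok (t := t) (ss := ss) (n + 1) 3 _
          (fun m' => pvBest t ss (n + 1 - 3) m') h2.2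
          (fun m' hm' => IH (n + 1 - 3) (by omega) m' hm')
        have h4 := pvTry_ok (t := t) (ss := ss) (n + 1) 4 _
          (fun m' => pvBest t ss (n + 1 - 4) m') h3.2
          (fun m' hm' => IH (n + 1 - 4) (by omega) m' hm')
        have h5 := pvTry_ok (t := t) (ss := ss) (n + 1) 5 _
          (fun m' => pvBest t ss (n + 1 - 5) m') h4.2
          (fun m' hm' => IH (n + 1 - 5) (by omega) m' hm')
        have hval : (pvTry t ss (n + 1) 5
            (pvTry t ss (n + 1) 4
              (pvTry t ss (n + 1) 3
                (pvTry t ss (n + 1) 2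
                  (pvTry t ss (n + 1) 1 (none, m) (fun m' => pvBest t ss (n + 1 - 1) m'))
                  (fun m' => pvBest t ss (n + 1 - 2) m'))
                (fun m' => pvBest t ss (n + 1 - 3) m'))
              (fun m' => pvBest t ss (n + 1 - 4) m'))
            (fun m' => pvBest t ss (n + 1 - 5) m')).1 = pvM t ss (n + 1) := by
          rw [h5.1, h4.1, h3.1, h2.1, h1.1]
          simp [pvM]
        refine ⟨hval, ?_, ?_⟩
        · rw [PySem.Dict.get?_insert, if_neg (by omega)]
          exact h5.2.1
        · intro k v hkv
          rw [PySem.Dict.get?_insert] at hkv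
          split at hkv
          · cases hkv; subst ‹k = n + 1›; exact hval
          · exact h5.2.2 k v hkv


-- encoding of B's Option result as A's -1-sentinel value
def pvEnc (o : Option Int) : Int := o.getD (-1)

-- one iteration of A's inner loop, related to one pvMStep of the pure recursion
lemma pvAInner_ok (t : String) (ss : PySem.Set String) (size i j : Nat)
    (hj1 : 1 ≤ j) (hisz : i ≤ size)
    (dp : List Int) (hlen : dp.length = size + 1)
    (hk : ∀ k : Nat, k ≤ size → k ≠ i → dp.getD k (-1) = if k < i then pvEnc (pvM t ss k) else -1)
    (res : Option Int) (hres : dp.getD i (-1) = pvEnc res) (hok : pvOk res) :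
    (pvAInner t ss (i : Int) dp (j : Int)).length = size + 1 ∧
    (∀ k : Nat, k ≤ size → k ≠ i →
        (pvAInner t ss (i : Int) dp (j : Int)).getD k (-1) = dp.getD k (-1)) ∧
    (pvAInner t ss (i : Int) dp (j : Int)).getD i (-1)
        = pvEnc (pvMStep t ss i j res (pvM t ss (i - j))) := by
  have hilt : i < dp.length := by omega
  by_cases hji : j ≤ i
  · have hcast : ((i - j : Nat) : Int) = (i : Int) - (j : Int) := by
      rw [Nat.cast_sub hji]
    have hgetsub : PySem.List.pyGetD dp ((i : Int) - (j : Int)) (-1) = dp.getD (i - j) (-1) := by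
      rw [← hcast, PySem.List.pyGetD_natCast]
    have hsubval : dp.getD (i - j) (-1) = pvEnc (pvM t ss (i - j)) := by
      rw [hk (i - j) (by omega) (by omega), if_pos (by omega)]
    have hgeti : PySem.List.pyGetD dp (i : Int) (-1) = pvEnc res := by
      rw [PySem.List.pyGetD_natCast, hres]
    by_cases hmem : PySem.Str.slice t (some ((i : Int) - (j : Int))) (some (i : Int)) ∈ ss
    · cases hMsub : pvM t ss (i - j) with
      | none =>
        have hm1 : dp.getD (i - j) (-1) = -1 := by rw [hsubval, hMsub]; rfl
        have hstep : pvMStep t ss i j res none = res := by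
          rw [pvMStep, if_pos ⟨hji, hmem⟩]; cases res <;> rfl
        rw [pvAInner, if_neg (fun h => h.2.2 (by rw [hgetsub, hm1])), hstep]
        exact ⟨hlen, fun _ _ _ => rfl, hres⟩
      | some s =>
        have hs : 0 ≤ s := pvM_ok t ss (i - j) s hMsub
        have hmS : dp.getD (i - j) (-1) = s := by rw [hsubval, hMsub]; rfl
        have hcond : (i : Int) - (j : Int) ≥ 0 ∧
            PySem.Str.slice t (some ((i : Int) - (j : Int))) (some (i : Int)) ∈ ss ∧
            PySem.List.pyGetD dp ((i : Int) - (j : Int)) (-1) ≠ -1 := by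
          refine ⟨by omega, hmem, ?_⟩
          rw [hgetsub, hmS]; omega
        have hstep : pvMStep t ss i j res (some s) = pvComb res (some s) := by
          rw [pvMStep, if_pos ⟨hji, hmem⟩]
        rw [pvAInner, if_pos hcond, hstep, hgetsub, hmS]
        cases res with
        | none =>
          rw [if_pos (by rw [hgeti]; rfl), PySem.List.pySetD_natCast]
          refine ⟨by simpa using hlen, ?_, ?_⟩
          · intro k hks hki
            simp only [List.getD_eq_getElem?_getD, List.getElem?_set_ne (by omega : i ≠ k)]
          · simp only [List.getD_eq_getElem?_getD, List.getElem?_set_self hilt]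
            rfl
        | some r =>
          have hr : 0 ≤ r := hok r rfl
          rw [if_neg (by rw [hgeti]; simp only [pvEnc, Option.getD_some]; omega), hgeti,
              PySem.List.pySetD_natCast]
          refine ⟨by simpa using hlen, ?_, ?_⟩
          · intro k hks hki
            simp only [List.getD_eq_getElem?_getD, List.getElem?_set_ne (by omega : i ≠ k)]
          · simp only [List.getD_eq_getElem?_getD, List.getElem?_set_self hilt]
            rfl
    · rw [pvAInner, if_neg (by intro h; exact hmem h.2.1), pvMStep, if_neg (by intro h; exact hmem h.2)]
      exact ⟨hlen, fun _ _ _ => rfl, hres⟩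
  · rw [pvAInner, if_neg (by intro h; have := h.1; omega),
        pvMStep, if_neg (by intro h; exact hji h.1)]
    exact ⟨hlen, fun _ _ _ => rfl, hres⟩

-- A's whole inner loop (j = 1..5) establishes dp[i] = pvEnc (pvM i)
lemma pvInner_loop (t : String) (ss : PySem.Set String) (size i : Nat)
    (hi1 : 1 ≤ i) (hisz : i ≤ size)
    (dp : List Int) (hlen : dp.length = size + 1)
    (hprev : ∀ k : Nat, k ≤ size → dp.getD k (-1) = if k < i then pvEnc (pvM t ss k) else -1) :
    ((PySem.List.pyRange 1 6 1).foldl (pvAInner t ss (i : Int)) dp).length = size + 1 ∧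
    ∀ k : Nat, k ≤ size →
      ((PySem.List.pyRange 1 6 1).foldl (pvAInner t ss (i : Int)) dp).getD k (-1)
        = if k ≤ i then pvEnc (pvM t ss k) else -1 := by
  have hrange : PySem.List.pyRange 1 6 1 = [1, 2, 3, 4, 5] := by decide
  rw [hrange]
  simp only [List.foldl_cons, List.foldl_nil]
  have hok0 : pvOk (none : Option Int) := fun v hv => by simp at hv
  have hres0 : dp.getD i (-1) = pvEnc (none : Option Int) := by
    rw [hprev i hisz, if_neg (by omega)]; rfl
  have hk0 : ∀ k : Nat, k ≤ size → k ≠ i →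
      dp.getD k (-1) = if k < i then pvEnc (pvM t ss k) else -1 :=
    fun k hks _ => hprev k hks
  have s1 := pvAInner_ok t ss size i 1 (by omega) hisz dp hlen hk0 none hres0 hok0
  simp only [Nat.cast_one] at s1
  set dp1 := pvAInner t ss (i : Int) dp 1 with hdp1
  set r1 := pvMStep t ss i 1 none (pvM t ss (i - 1)) with hr1
  have hok1 : pvOk r1 := pvMStep_ok hok0 (pvM_ok t ss (i - 1))
  have hk1 : ∀ k : Nat, k ≤ size → k ≠ i →
      dp1.getD k (-1) = if k < i then pvEnc (pvM t ss k) else -1 :=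
    fun k hks hki => by rw [s1.2.1 k hks hki]; exact hprev k hks
  have s2 := pvAInner_ok t ss size i 2 (by omega) hisz dp1 s1.1 hk1 r1 s1.2.2 hok1
  simp only [Nat.cast_ofNat] at s2
  set dp2 := pvAInner t ss (i : Int) dp1 2 with hdp2
  set r2 := pvMStep t ss i 2 r1 (pvM t ss (i - 2)) with hr2
  have hok2 : pvOk r2 := pvMStep_ok hok1 (pvM_ok t ss (i - 2))
  have hk2 : ∀ k : Nat, k ≤ size → k ≠ i →
      dp2.getD k (-1) = if k < i then pvEnc (pvM t ss k) else -1 :=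
    fun k hks hki => by rw [s2.2.1 k hks hki]; exact hk1 k hks hki
  have s3 := pvAInner_ok t ss size i 3 (by omega) hisz dp2 s2.1 hk2 r2 s2.2.2 hok2
  simp only [Nat.cast_ofNat] at s3
  set dp3 := pvAInner t ss (i : Int) dp2 3 with hdp3
  set r3 := pvMStep t ss i 3 r2 (pvM t ss (i - 3)) with hr3
  have hok3 : pvOk r3 := pvMStep_ok hok2 (pvM_ok t ss (i - 3))
  have hk3 : ∀ k : Nat, k ≤ size → k ≠ i →
      dp3.getD k (-1) = if k < i then pvEnc (pvM t ss k) else -1 :=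
    fun k hks hki => by rw [s3.2.1 k hks hki]; exact hk2 k hks hki
  have s4 := pvAInner_ok t ss size i 4 (by omega) hisz dp3 s3.1 hk3 r3 s3.2.2 hok3
  simp only [Nat.cast_ofNat] at s4
  set dp4 := pvAInner t ss (i : Int) dp3 4 with hdp4
  set r4 := pvMStep t ss i 4 r3 (pvM t ss (i - 4)) with hr4
  have hok4 : pvOk r4 := pvMStep_ok hok3 (pvM_ok t ss (i - 4))
  have hk4 : ∀ k : Nat, k ≤ size → k ≠ i →
      dp4.getD k (-1) = if k < i then pvEnc (pvM t ss k) else -1 :=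
    fun k hks hki => by rw [s4.2.1 k hks hki]; exact hk3 k hks hki
  have s5 := pvAInner_ok t ss size i 5 (by omega) hisz dp4 s4.1 hk4 r4 s4.2.2 hok4
  simp only [Nat.cast_ofNat] at s5
  set dp5 := pvAInner t ss (i : Int) dp4 5 with hdp5
  have hMi : pvM t ss i = pvMStep t ss i 5 r4 (pvM t ss (i - 5)) := by
    obtain ⟨n, rfl⟩ : ∃ n, i = n + 1 := ⟨i - 1, by omega⟩
    simp only [pvM, hr1, hr2, hr3, hr4]
  refine ⟨s5.1, fun k hks => ?_⟩
  by_cases hki : k = i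
  · subst hki
    rw [s5.2.2, if_pos le_rfl, hMi]
  · rw [s5.2.1 k hks hki, hk4 k hks hki]
    have : k < i ↔ (k ≤ i ∧ k ≠ i) := by omega
    by_cases h : k < i
    · rw [if_pos h, if_pos (by omega)]
    · rw [if_neg h, if_neg (by omega)]

-- A's outer loop invariant, by induction on the processed prefix
lemma pvOuter_loop (t : String) (ss : PySem.Set String) (size : Nat) :
    ∀ m : Nat, m ≤ size →
      (((PySem.List.pyRange 1 ((m : Int) + 1) 1).foldl
          (fun dp i => (PySem.List.pyRange 1 6 1).foldl (pvAInner t ss i) dp)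
          (PySem.List.pySetD (List.replicate (size + 1) (-1)) 0 0)).length = size + 1) ∧
      ∀ k : Nat, k ≤ size →
        ((PySem.List.pyRange 1 ((m : Int) + 1) 1).foldl
            (fun dp i => (PySem.List.pyRange 1 6 1).foldl (pvAInner t ss i) dp)
            (PySem.List.pySetD (List.replicate (size + 1) (-1)) 0 0)).getD k (-1)
          = if k ≤ m then pvEnc (pvM t ss k) else -1 := by
  intro m
  induction m with
  | zero =>
    intro _
    rw [show ((0 : Nat) : Int) + 1 = 1 by norm_num,
        PySem.List.pyRange_one_eq_nil (show (1:Int) ≤ 1 from le_refl 1)]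
    simp only [List.foldl_nil]
    have hset : PySem.List.pySetD (List.replicate (size + 1) (-1 : Int)) 0 0
        = (List.replicate (size + 1) (-1 : Int)).set 0 0 := by
      simp [PySem.List.pySetD_of_nonneg]
    rw [hset]
    constructor
    · simp
    · intro k hks
      by_cases hk0 : k = 0
      · subst hk0
        rw [List.getD_eq_getElem?_getD, List.getElem?_set_self (by simp)]
        simp [pvM, pvEnc]
      · rw [List.getD_eq_getElem?_getD, List.getElem?_set_ne (by omega : 0 ≠ k),
            if_neg (by omega)]
        rw [List.getElem?_replicate, if_pos (by omega : k < size + 1)]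
        rfl
  | succ m IH =>
    intro hm
    have IH' := IH (by omega)
    have hsplit : PySem.List.pyRange 1 (((m + 1 : Nat) : Int) + 1) 1
        = PySem.List.pyRange 1 ((m : Int) + 1) 1 ++ [(m : Int) + 1] := by
      rw [show (((m + 1 : Nat) : Int) + 1) = ((m : Int) + 1) + 1 by push_cast; ring]
      exact PySem.List.pyRange_one_succ_right (show (1:Int) ≤ (m:Int) + 1 by omega)
    rw [hsplit, List.foldl_append]
    simp only [List.foldl_cons, List.foldl_nil]
    have hcast : ((m : Int) + 1) = ((m + 1 : Nat) : Int) := by push_cast; ring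
    rw [hcast]
    have hinner := pvInner_loop t ss size (m + 1) (by omega) hm _ IH'.1
      (fun k hks => by rw [IH'.2 k hks]; simp only [Nat.lt_succ_iff])
    exact ⟨hinner.1, fun k hks => hinner.2 k hks⟩

lemma pvSolution_eq (strs : List String) (t : String) :
    solution strs t = pvEnc (pvM t (PySem.Set.ofList strs) t.toList.length) := by
  unfold solution
  dsimp only
  have hlen : PySem.Str.len t = (t.toList.length : Int) := by simp [PySem.Str.len_eq]
  rw [hlen]
  set L := t.toList.length with hL
  have htn : (((L : Int)) + 1).toNat = L + 1 := by omega
  rw [htn]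
  have h := pvOuter_loop t (PySem.Set.ofList strs) L L le_rfl
  set dpf := (PySem.List.pyRange 1 ((L : Int) + 1) 1).foldl
      (fun dp i => (PySem.List.pyRange 1 6 1).foldl (pvAInner t (PySem.Set.ofList strs) i) dp)
      (PySem.List.pySetD (List.replicate (L + 1) (-1)) 0 0) with hdpf
  have hne : dpf ≠ [] := by
    intro hnil; rw [hnil] at h; simp at h
  rw [PySem.List.pyGetD_neg_one dpf (-1) hne]
  have hlast : dpf.getLast hne = dpf.getD L (-1) := by
    rw [List.getLast_eq_getElem, List.getD_eq_getElem?_getD]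
    rw [List.getElem?_eq_getElem (by omega : L < dpf.length)]
    congr 1
    omega
  rw [hlast, h.2 L le_rfl, if_pos le_rfl]

lemma pvWarm (t : String) (ss : PySem.Set String)
    (st0 : Option Int × PySem.Dict Nat (Option Int)) (h0 : pvValid t ss st0.2) :
    ∀ m : Nat,
      (((PySem.List.pyRange 0 ((m : Int) + 1) 1).foldl
          (fun st i => pvBest t ss i.toNat st.2) st0).1 = pvM t ss m) ∧
      pvValid t ss (((PySem.List.pyRange 0 ((m : Int) + 1) 1).foldl
          (fun st i => pvBest t ss i.toNat st.2) st0).2) := by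
  intro m
  induction m with
  | zero =>
    rw [show ((0 : Nat) : Int) + 1 = 1 by norm_num,
        show PySem.List.pyRange 0 1 1 = [0] from by decide]
    simp only [List.foldl_cons, List.foldl_nil, Int.toNat_zero]
    exact pvBest_ok t ss 0 st0.2 h0
  | succ m IH =>
    have hsplit : PySem.List.pyRange 0 (((m + 1 : Nat) : Int) + 1) 1
        = PySem.List.pyRange 0 ((m : Int) + 1) 1 ++ [(m : Int) + 1] := by
      rw [show (((m + 1 : Nat) : Int) + 1) = ((m : Int) + 1) + 1 by push_cast; ring]
      exact PySem.List.pyRange_one_succ_right (show (0 : Int) ≤ (m : Int) + 1 by omega)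
    rw [hsplit, List.foldl_append]
    simp only [List.foldl_cons, List.foldl_nil]
    rw [show ((m : Int) + 1).toNat = m + 1 by omega]
    exact pvBest_ok t ss (m + 1) _ (IH).2

lemma pvSolutionAlt_eq (strs : List String) (t : String) :
    solution_alt strs t = pvEnc (pvM t (PySem.Set.ofList strs) t.toList.length) := by
  unfold solution_alt
  dsimp only
  have hlen : (PySem.Str.len t).toNat = t.toList.length := by
    simp [PySem.Str.len_eq]
  rw [hlen]
  have hvalid : pvValid t (PySem.Set.ofList strs)
      ((PySem.Dict.empty : PySem.Dict Nat (Option Int)).insert 0 (some 0)) := by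
    constructor
    · exact PySem.Dict.get?_insert_self _ _ _
    · intro k v hkv
      rw [PySem.Dict.get?_insert] at hkv
      split at hkv
      · cases hkv; subst ‹k = 0›; simp [pvM]
      · simp [PySem.Dict.get?_empty] at hkv
  have h := pvWarm t (PySem.Set.ofList strs)
    (none, (PySem.Dict.empty : PySem.Dict Nat (Option Int)).insert 0 (some 0)) hvalid
    t.toList.length
  rw [h.1]
  cases pvM t (PySem.Set.ofList strs) t.toList.length with
  | none => rfl
  | some k => rfl

-- ===== VERDICT (by name: the statement is the Claim_ definition above) =====
theorem solution_spec : Claim_equal_solution := by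
  intro strs t _
  unfold Spec_solution
  rw [pvSolution_eq, pvSolutionAlt_eq]
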